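-- pv_equiv track=rewrite | github.com/Sangmin627/AlgoStudy2023 | 창재/프로그래머스/3차/[2018 KAKAO BLIND RECRUITMENT] [1차] 프렌즈4블록.py | remove_all
-- ===== SOURCE A (Python) =====
-- def remove_all(board, memo):
--     sort_memo = list(memo)
--     sort_memo.sort()
--     for m in sort_memo:
--         x, y = m[0], m[1]
--         board[x][y] = '0'
--         while x > 0 and board[x - 1][y] != '0':
--             board[x][y] = board[x - 1][y]
--             board[x - 1][y] = '0'
--
--             x -= 1
--
--     return board
--
-- m = 4
--
-- board = ["CCBDE", "AAADE", "AAABF", "CCBBF"]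
-- ===== SOURCE B (Python) =====
-- # B: per-column compaction. Builds a NEW board (A mutates its argument in place;
-- # the equivalence claimed is about the return value).
-- def remove_all(board, memo):
--     n = len(board)
--     by_col = {}
--     for x, y in memo:
--         by_col.setdefault(y, []).append(x)
--     new_cols = {}
--     for y, rows in by_col.items():
--         rows.sort()
--         col = [row[y] for row in board]
--         z = 0
--         while z < n and col[z] == '0':
--             z += 1
--         live = col[z:]
--         for r in rows:
--             if r >= z:
--                 del live[r - z]
--                 z += 1
--         new_cols[y] = ['0'] * z + live
--     return [[new_cols[y][i] if y in new_cols else cell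
--              for y, cell in enumerate(row)]
--             for i, row in enumerate(board)]
-- ===== Notes on version B (the rewrite author's own statement) =====
-- stated objective: alternative
-- what changed: Instead of A's global sorted sweep that bubbles each removed cell's column upward one swap at a time, B groups the marked cells by column and, for each marked column, computes the surviving cells in one pass (zero-prefix length plus ordered deletions from the live suffix), rebuilding the board as a pure map; A mutates the board in place, B returns a new board.
-- outside the precondition, e.g. on remove_all([['A'], ['B']], {(-1, 0)}): A returns [['A'], ['0']], B returns [['A'], ['B']]
import Mathlib
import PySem

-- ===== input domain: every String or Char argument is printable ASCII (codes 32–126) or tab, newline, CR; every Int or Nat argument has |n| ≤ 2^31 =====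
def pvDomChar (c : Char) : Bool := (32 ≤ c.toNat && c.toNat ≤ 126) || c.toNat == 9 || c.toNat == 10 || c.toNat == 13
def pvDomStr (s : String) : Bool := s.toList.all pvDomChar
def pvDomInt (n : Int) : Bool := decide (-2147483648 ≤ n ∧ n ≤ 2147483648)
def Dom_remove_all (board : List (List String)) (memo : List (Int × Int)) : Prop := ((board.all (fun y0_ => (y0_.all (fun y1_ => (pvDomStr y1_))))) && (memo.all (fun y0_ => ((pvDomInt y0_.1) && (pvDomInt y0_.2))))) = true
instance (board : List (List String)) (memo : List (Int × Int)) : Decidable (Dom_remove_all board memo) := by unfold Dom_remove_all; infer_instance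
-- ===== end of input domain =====

-- A removes the marked cells by a global sorted sweep, bubbling each removed cell's column
-- down one swap at a time; B compacts each marked column in one pass and rebuilds the board
-- as a pure map.  A mutates `board` in place; B returns a new board — the equivalence
-- claimed here is about the return value.

-- ===== PORT A =====
-- board[x][y] (with defaults; in-range under Pre_)
def pyCell (b : List (List String)) (x y : Int) : String :=
  PySem.List.pyGetD (PySem.List.pyGetD b x []) y ""

-- board[x][y] = v
def pySetCell (b : List (List String)) (x y : Int) (v : String) : List (List String) :=
  PySem.List.pySetD b x (PySem.List.pySetD (PySem.List.pyGetD b x []) y v)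

-- the `while x > 0 and board[x-1][y] != '0':` loop of A
def cascadeA (b : List (List String)) (x y : Int) : List (List String) :=
  if h : 0 < x ∧ pyCell b (x - 1) y ≠ "0" then
    cascadeA (pySetCell (pySetCell b x y (pyCell b (x - 1) y)) (x - 1) y "0") (x - 1) y
  else b
termination_by x.toNat
decreasing_by omega

def remove_all (board : List (List String)) (memo : List (Int × Int)) : List (List String) :=
  (PySem.List.sorted2 memo Prod.fst Prod.snd false).foldl
    (fun b m => cascadeA (pySetCell b m.1 m.2 "0") m.1 m.2) board

-- ===== PORT B =====
-- the `while z < n and col[z] == '0':` loop of B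
def advZ (col : List String) (n z : Int) : Int :=
  if h : z < n ∧ PySem.List.pyGetD col z "" = "0" then advZ col n (z + 1) else z
termination_by (n - z).toNat
decreasing_by omega

-- `if r >= z: del live[r-z]; z += 1` for one marked row r
def delStep (s : Int × List String) (r : Int) : Int × List String :=
  if s.1 ≤ r then
    (s.1 + 1, match PySem.List.pop? s.2 (r - s.1) with
              | some pr => pr.2
              | none => s.2)
  else s

-- the body of B's per-column loop: new_cols[y]
def compactCol (board : List (List String)) (n y : Int) (rows0 : List Int) : List String :=
  let rows := PySem.List.sorted rows0 (fun x => x) false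
  let col := board.map (fun row => PySem.List.pyGetD row y "")
  let z := advZ col n 0
  let live := PySem.List.slice col (some z) none
  let s := rows.foldl delStep (z, live)
  List.replicate s.1.toNat "0" ++ s.2

def remove_all_alt (board : List (List String)) (memo : List (Int × Int)) : List (List String) :=
  let n : Int := board.length
  let byCol : PySem.Dict Int (List Int) :=
    memo.foldl (fun d m => d.modify m.2 [] (fun l => l ++ [m.1])) PySem.Dict.empty
  let newCols : PySem.Dict Int (List String) :=
    byCol.items.foldl (fun d p => d.insert p.1 (compactCol board n p.1 p.2)) PySem.Dict.empty
  (PySem.List.enumerate board 0).map (fun q =>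
    (PySem.List.enumerate q.2 0).map (fun p =>
      match newCols.get? p.1 with
      | some nc => PySem.List.pyGetD nc q.1 ""
      | none => p.2))

-- ===== PRECONDITION & SPEC =====
-- column y of the board, as a list (default "" out of range; used by Pre_ and the proofs)
def colAt (b : List (List String)) (y : Int) : List String :=
  b.map (fun row => PySem.List.pyGetD row y "")

-- Pre_ excludes: marks whose indices are out of range (A raises IndexError), negative
-- in-range marks (A returns a value there only through Python's negative-index wraparound,
-- and its `x > 0` guard then skips the gravity step), and marked columns in which some '0'
-- cell sits below a non-'0' cell (a floating hole; '0' denotes an empty cell and the game's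
-- boards keep empty cells on top of each column — A's partial cascade there is an accident
-- of its sweep).
def Pre_remove_all (board : List (List String)) (memo : List (Int × Int)) : Prop :=
  ∀ m ∈ memo, 0 ≤ m.1 ∧ m.1 < (board.length : Int) ∧ 0 ≤ m.2 ∧
    (∀ row ∈ board, m.2 < (row.length : Int)) ∧
    (∀ s ∈ (colAt board m.2).dropWhile (fun t => t == "0"), s ≠ "0")

instance (board : List (List String)) (memo : List (Int × Int)) : Decidable (Pre_remove_all board memo) := by
  unfold Pre_remove_all; infer_instance

def pvWitness_remove_all : List (List String) × (List (Int × Int)) :=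
  ([["C", "B"], ["A", "B"]], [(1, 0), (0, 1)])

def Spec_remove_all (board : List (List String)) (memo : List (Int × Int)) (out : List (List String)) : Prop := out = remove_all_alt board memo
instance (board : List (List String)) (memo : List (Int × Int)) (out : List (List String)) : Decidable (Spec_remove_all board memo out) := by unfold Spec_remove_all; infer_instance

-- ===== CLAIM (what is proved, stated in full; the proofs are below) =====
def Claim_equal_remove_all : Prop := ∀ (board : List (List String)) (memo : List (Int × Int)), Dom_remove_all board memo → Pre_remove_all board memo → Spec_remove_all board memo (remove_all board memo)

-- ===== LEMMAS AND PROOFS =====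

-- ---------- proof-side helpers ----------

-- column-level version of A's while loop
def colCasc (c : List String) (x : Int) : List String :=
  if h : 0 < x ∧ PySem.List.pyGetD c (x - 1) "" ≠ "0" then
    colCasc (PySem.List.pySetD (PySem.List.pySetD c x (PySem.List.pyGetD c (x - 1) "")) (x - 1) "0") (x - 1)
  else c
termination_by x.toNat
decreasing_by omega

-- column-level version of one iteration of A's outer loop
def colStep (c : List String) (x : Int) : List String :=
  colCasc (PySem.List.pySetD c x "0") x

def WideCol (b : List (List String)) (y : Int) : Prop :=
  ∀ row ∈ b, y < (row.length : Int)

-- ---------- small utilities ----------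
theorem set_getD_self {α : Type} (l : List α) (i : Nat) (d : α) :
    l.set i (l.getD i d) = l := by
  induction l generalizing i with
  | nil => rfl
  | cons a t ih =>
    cases i with
    | zero => simp [List.getD]
    | succ n => simp [List.getD] at ih ⊢; exact ih n

theorem set_of_length_le {α : Type} (l : List α) (i : Nat) (v : α) (h : l.length ≤ i) :
    l.set i v = l := by
  induction l generalizing i with
  | nil => rfl
  | cons a t ih =>
    cases i with
    | zero => simp at h
    | succ n => simp at h ⊢; exact ih n h

theorem pyGetD_toNat {α : Type} (xs : List α) {i : Int} (d : α) (h : 0 ≤ i) :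
    PySem.List.pyGetD xs i d = xs.getD i.toNat d := by
  obtain ⟨n, rfl⟩ := Int.eq_ofNat_of_zero_le h
  simp

theorem pyGetD_nil (y : Int) : PySem.List.pyGetD ([] : List String) y "" = "" := by
  simp [PySem.List.pyGetD, PySem.List.pyGet?]

-- board[x][y] with nonnegative indices, in Nat form
theorem pyCell_eq (b : List (List String)) {x y : Int} (hx : 0 ≤ x) (hy : 0 ≤ y) :
    pyCell b x y = (b.getD x.toNat []).getD y.toNat "" := by
  unfold pyCell
  rw [pyGetD_toNat _ _ hx, pyGetD_toNat _ _ hy]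

theorem pySetCell_eq (b : List (List String)) {x y : Int} (v : String) (hx : 0 ≤ x) (hy : 0 ≤ y) :
    pySetCell b x y v = b.set x.toNat ((b.getD x.toNat []).set y.toNat v) := by
  unfold pySetCell
  rw [PySem.List.pySetD_of_nonneg _ _ hx, PySem.List.pySetD_of_nonneg _ _ hy,
    pyGetD_toNat _ _ hx]

theorem length_colAt (b : List (List String)) (y : Int) :
    (colAt b y).length = b.length := by simp [colAt]

theorem colAt_getD (b : List (List String)) (y : Int) (i : Nat) :
    (colAt b y).getD i "" = PySem.List.pyGetD (b.getD i []) y "" := by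
  have h := List.getD_map b [] (n := i) (fun row => PySem.List.pyGetD row y "")
  rw [pyGetD_nil] at h
  exact h

-- ---------- projection of A's cell operations to one column ----------
theorem colAt_pySetCell_same (b : List (List String)) {x y : Int} (v : String)
    (hx : 0 ≤ x) (hy : 0 ≤ y) (hw : WideCol b y) :
    colAt (pySetCell b x y v) y = (colAt b y).set x.toNat v := by
  rw [pySetCell_eq b v hx hy]
  by_cases hlt : x.toNat < b.length
  · have hrow : b.getD x.toNat [] = b[x.toNat] := List.getD_eq_getElem b [] hlt
    have hmem : b[x.toNat] ∈ b := List.getElem_mem hlt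
    have hylen : y.toNat < (b[x.toNat]).length := by
      have := hw _ hmem; omega
    unfold colAt
    rw [List.map_set]
    congr 1
    rw [hrow, pyGetD_toNat _ _ hy, List.getD_eq_getElem _ _ (by simpa using hylen),
      List.getElem_set_self]
  · rw [set_of_length_le _ _ _ (by omega), set_of_length_le _ _ _ (by simp [length_colAt]; omega)]

theorem colAt_pySetCell_other (b : List (List String)) {x y j : Int} (v : String)
    (hx : 0 ≤ x) (hy : 0 ≤ y) (hj : 0 ≤ j) (hne : j ≠ y) :
    colAt (pySetCell b x y v) j = colAt b j := by
  rw [pySetCell_eq b v hx hy]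
  unfold colAt
  rw [List.map_set]
  have hij : y.toNat ≠ j.toNat := by omega
  have : PySem.List.pyGetD ((b.getD x.toNat []).set y.toNat v) j "" =
      PySem.List.pyGetD (b.getD x.toNat []) j "" := by
    rw [pyGetD_toNat _ _ hj, pyGetD_toNat _ _ hj]
    unfold List.getD
    rw [List.getElem?_set_ne hij]
  rw [this]
  have h2 : PySem.List.pyGetD (b.getD x.toNat []) j "" =
      (List.map (fun row => PySem.List.pyGetD row j "") b).getD x.toNat "" := (colAt_getD b j x.toNat).symm
  rw [h2, set_getD_self]

theorem map_len_pySetCell (b : List (List String)) {x y : Int} (v : String)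
    (hx : 0 ≤ x) (hy : 0 ≤ y) :
    (pySetCell b x y v).map List.length = b.map List.length := by
  rw [pySetCell_eq b v hx hy, List.map_set]
  have : ((b.getD x.toNat []).set y.toNat v).length = (b.map List.length).getD x.toNat 0 := by
    have h := List.getD_map b [] (n := x.toNat) List.length
    simp at h
    simp [h]
  rw [this, set_getD_self]

theorem WideCol_of_map_len {b b' : List (List String)} {y : Int}
    (h : b'.map List.length = b.map List.length) (hw : WideCol b y) : WideCol b' y := by
  intro row hr
  have : row.length ∈ b'.map List.length := List.mem_map_of_mem hr
  rw [h] at this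
  obtain ⟨r0, hr0, he⟩ := List.mem_map.1 this
  rw [← he]
  exact hw r0 hr0

theorem pyCell_colAt (b : List (List String)) {x y : Int} (hx : 0 ≤ x) (hy : 0 ≤ y) :
    pyCell b x y = PySem.List.pyGetD (colAt b y) x "" := by
  rw [pyCell_eq b hx hy, pyGetD_toNat _ _ hx, colAt_getD b y x.toNat, pyGetD_toNat _ _ hy]

-- ---------- cascadeA projects to colCasc on its own column ----------
theorem map_len_cascadeA (b : List (List String)) (x y : Int) :
    0 ≤ y → (cascadeA b x y).map List.length = b.map List.length := by
  induction b, x using cascadeA.induct (y := y) with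
  | case1 b x h ih =>
    intro hy
    rw [cascadeA]
    rw [dif_pos h]
    rw [ih hy, map_len_pySetCell _ _ (by omega) hy, map_len_pySetCell _ _ (by omega) hy]
  | case2 b x h =>
    intro hy
    rw [cascadeA, dif_neg h]

theorem colAt_cascadeA_same (b : List (List String)) (x y : Int) :
    0 ≤ x → 0 ≤ y → WideCol b y →
    colAt (cascadeA b x y) y = colCasc (colAt b y) x := by
  induction b, x using cascadeA.induct (y := y) with
  | case1 b x h ih =>
    intro hx hy hw
    have hx1 : (0:Int) ≤ x - 1 := by omega
    have hcond : PySem.List.pyGetD (colAt b y) (x - 1) "" ≠ "0" := by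
      rw [← pyCell_colAt b hx1 hy]; exact h.2
    rw [cascadeA, dif_pos h, colCasc, dif_pos ⟨h.1, hcond⟩]
    have hw1 : WideCol (pySetCell b x y (pyCell b (x - 1) y)) y :=
      WideCol_of_map_len (map_len_pySetCell _ _ hx hy) hw
    have hw2 : WideCol (pySetCell (pySetCell b x y (pyCell b (x - 1) y)) (x - 1) y "0") y :=
      WideCol_of_map_len (map_len_pySetCell _ _ hx1 hy) hw1
    rw [ih hx1 hy hw2]
    congr 1
    rw [colAt_pySetCell_same _ _ hx1 hy hw1, colAt_pySetCell_same _ _ hx hy hw,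
      PySem.List.pySetD_of_nonneg _ _ hx1, PySem.List.pySetD_of_nonneg _ _ hx,
      pyCell_colAt b hx1 hy]
  | case2 b x h =>
    intro hx hy hw
    rw [cascadeA, dif_neg h, colCasc]
    rw [dif_neg]
    intro hc
    exact h ⟨hc.1, by rw [pyCell_colAt b (by omega) hy]; exact hc.2⟩

theorem colAt_cascadeA_other (b : List (List String)) (x y : Int) (j : Int) :
    0 ≤ x → 0 ≤ y → 0 ≤ j → j ≠ y →
    colAt (cascadeA b x y) j = colAt b j := by
  induction b, x using cascadeA.induct (y := y) with
  | case1 b x h ih =>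
    intro hx hy hj hne
    have hx1 : (0:Int) ≤ x - 1 := by omega
    rw [cascadeA, dif_pos h, ih hx1 hy hj hne,
      colAt_pySetCell_other _ _ hx1 hy hj hne, colAt_pySetCell_other _ _ hx hy hj hne]
  | case2 b x h =>
    intro _ _ _ _
    rw [cascadeA, dif_neg h]

-- ---------- A's outer loop, seen on one column ----------
theorem foldA_col (ms : List (Int × Int)) (b : List (List String)) (j : Int)
    (hj : 0 ≤ j)
    (hms : ∀ m ∈ ms, 0 ≤ m.1 ∧ 0 ≤ m.2 ∧ WideCol b m.2) :
    colAt (ms.foldl (fun b m => cascadeA (pySetCell b m.1 m.2 "0") m.1 m.2) b) j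
      = ((ms.filter (fun m => m.2 == j)).map Prod.fst).foldl colStep (colAt b j) := by
  induction ms generalizing b with
  | nil => simp
  | cons m t ih =>
    obtain ⟨hx, hy, hw⟩ := hms m List.mem_cons_self
    have hlen : (cascadeA (pySetCell b m.1 m.2 "0") m.1 m.2).map List.length = b.map List.length := by
      rw [map_len_cascadeA _ _ _ hy, map_len_pySetCell _ _ hx hy]
    have hms' : ∀ m' ∈ t, 0 ≤ m'.1 ∧ 0 ≤ m'.2 ∧ WideCol (cascadeA (pySetCell b m.1 m.2 "0") m.1 m.2) m'.2 := by
      intro m' hm'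
      obtain ⟨h1, h2, h3⟩ := hms m' (List.mem_cons_of_mem _ hm')
      exact ⟨h1, h2, WideCol_of_map_len hlen h3⟩
    simp only [List.foldl_cons]
    rw [ih _ hms']
    by_cases hcase : m.2 = j
    · subst hcase
      have hw1 : WideCol (pySetCell b m.1 m.2 "0") m.2 :=
        WideCol_of_map_len (map_len_pySetCell _ _ hx hy) hw
      rw [colAt_cascadeA_same _ _ _ hx hy hw1, colAt_pySetCell_same _ _ hx hy hw,
        ← PySem.List.pySetD_of_nonneg _ _ hx]
      simp [colStep]
    · rw [colAt_cascadeA_other _ _ _ _ hx hy hj (Ne.symm hcase),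
        colAt_pySetCell_other _ _ hx hy hj (Ne.symm hcase)]
      simp [hcase]

theorem map_len_foldA (ms : List (Int × Int)) (b : List (List String))
    (hms : ∀ m ∈ ms, 0 ≤ m.1 ∧ 0 ≤ m.2) :
    (ms.foldl (fun b m => cascadeA (pySetCell b m.1 m.2 "0") m.1 m.2) b).map List.length
      = b.map List.length := by
  induction ms generalizing b with
  | nil => rfl
  | cons m t ih =>
    obtain ⟨hx, hy⟩ := hms m List.mem_cons_self
    simp only [List.foldl_cons]
    rw [ih _ (fun m' hm' => hms m' (List.mem_cons_of_mem _ hm')),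
      map_len_cascadeA _ _ _ hy, map_len_pySetCell _ _ hx hy]

-- ---------- the bubbling loop on one column ----------
theorem casc2 (pre : List String) : ∀ (z : Nat) (post : List String),
    (∀ s ∈ pre, s ≠ "0") →
    colCasc (List.replicate z "0" ++ pre ++ "0" :: post) ((z + pre.length : Nat) : Int)
      = List.replicate (z + 1) "0" ++ pre ++ post := by
  induction pre using List.reverseRecOn with
  | nil =>
    intro z post _
    rw [colCasc, dif_neg]
    · simp [List.replicate_succ']
    · rintro ⟨h1, h2⟩
      apply h2
      simp only [List.length_nil, Nat.add_zero] at h1 ⊢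
      rw [pyGetD_toNat _ _ (by omega)]
      have hz : 0 < z := by omega
      have hidx : ((z : Int) - 1).toNat < (List.replicate z "0").length := by
        simp [List.length_replicate]; omega
      simp only [List.append_nil]
      rw [List.getD_append _ _ _ _ hidx, List.getD_eq_getElem _ _ hidx, List.getElem_replicate]
  | append_singleton p a ih =>
    intro z post hpre
    have ha : a ≠ "0" := hpre a (by simp)
    have hp : ∀ s ∈ p, s ≠ "0" := fun s hs => hpre s (by simp [hs])
    have hL : (List.replicate z "0" ++ p).length = z + p.length := by simp
    have hc : List.replicate z "0" ++ (p ++ [a]) ++ "0" :: post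
        = (List.replicate z "0" ++ p) ++ a :: "0" :: post := by simp
    have hxlen : (z + (p ++ [a]).length : Nat) = z + p.length + 1 := by
      simp only [List.length_append, List.length_cons, List.length_nil]
      omega
    have hgetA : PySem.List.pyGetD (List.replicate z "0" ++ (p ++ [a]) ++ "0" :: post)
        (((z + (p ++ [a]).length : Nat) : Int) - 1) "" = a := by
      rw [hxlen, hc, pyGetD_toNat _ _ (by omega)]
      have : (((z + p.length + 1 : Nat) : Int) - 1).toNat = (List.replicate z "0" ++ p).length := by
        simp; omega
      rw [this, List.getD_append_right _ _ _ _ (le_refl _), Nat.sub_self]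
      rfl
    rw [colCasc, dif_pos ⟨by simp; omega, by rw [hgetA]; exact ha⟩]
    rw [hgetA]
    have hset : PySem.List.pySetD
        (PySem.List.pySetD (List.replicate z "0" ++ (p ++ [a]) ++ "0" :: post)
          ((z + (p ++ [a]).length : Nat) : Int) a)
        (((z + (p ++ [a]).length : Nat) : Int) - 1) "0"
        = List.replicate z "0" ++ p ++ "0" :: a :: post := by
      rw [hxlen, hc, PySem.List.pySetD_of_nonneg _ _ (by omega),
        PySem.List.pySetD_of_nonneg _ _ (by omega)]
      have h1 : ((z + p.length + 1 : Nat) : Int).toNat = (List.replicate z "0" ++ p).length + 1 := by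
        simp only [List.length_append, List.length_replicate, Int.toNat_natCast]
      rw [h1, List.set_append_right _ _ (by omega)]
      have h2 : (List.replicate z "0" ++ p).length + 1 - (List.replicate z "0" ++ p).length = 1 := by
        omega
      rw [h2]
      show ((List.replicate z "0" ++ p) ++ (a :: "0" :: post).set 1 a).set
          (((z + p.length + 1 : Nat) : Int) - 1).toNat "0" = _
      have h3 : (((z + p.length + 1 : Nat) : Int) - 1).toNat = (List.replicate z "0" ++ p).length := by
        simp; omega
      rw [h3, List.set_append_right _ _ (le_refl _), Nat.sub_self]
      simp
    rw [hset]
    have hc2 : List.replicate z "0" ++ p ++ "0" :: a :: post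
        = List.replicate z "0" ++ p ++ "0" :: (a :: post) := by simp
    have hx2 : ((z + (p ++ [a]).length : Nat) : Int) - 1 = ((z + p.length : Nat) : Int) := by
      simp; omega
    rw [hx2, ih z (a :: post) hp]
    simp

-- ---------- one-column equivalence: A's repeated bubbling = B's state fold ----------
theorem core (rows : List Int) : ∀ (z : Nat) (live : List String),
    (∀ r ∈ rows, 0 ≤ r ∧ r < (z : Int) + live.length) →
    (∀ s ∈ live, s ≠ "0") →
    rows.foldl colStep (List.replicate z "0" ++ live)
      = (fun s : Int × List String => List.replicate s.1.toNat "0" ++ s.2)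
          (rows.foldl delStep ((z : Int), live)) := by
  induction rows with
  | nil => intro z live _ _; simp
  | cons r t ih =>
    intro z live hb hnz
    obtain ⟨hr0, hrlt⟩ := hb r List.mem_cons_self
    simp only [List.foldl_cons]
    by_cases hzr : (z : Int) ≤ r
    · -- the marked cell is live: remove it and let the block above fall
      have hj : (r - z).toNat < live.length := by omega
      have hrj : r = ((z + (r - z).toNat : Nat) : Int) := by omega
      have hstep : colStep (List.replicate z "0" ++ live) r
          = List.replicate (z + 1) "0" ++ live.eraseIdx (r - z).toNat := by
        unfold colStep
        set j := (r - (z : Int)).toNat with hjdef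
        rw [PySem.List.pySetD_of_nonneg _ _ hr0]
        have htn : r.toNat = (List.replicate z ("0" : String)).length + j := by
          simp only [List.length_replicate]; omega
        rw [htn, List.set_append_right _ _ (by omega), Nat.add_sub_cancel_left,
          List.set_eq_take_append_cons_drop, if_pos hj]
        have hx : r = ((z + (live.take j).length : Nat) : Int) := by
          rw [List.length_take]; omega
        rw [hx, List.eraseIdx_eq_take_drop_succ]
        have hcc := casc2 (live.take j) z (live.drop (j + 1))
          (fun s hs => hnz s (List.mem_of_mem_take hs))
        simpa [List.append_assoc] using hcc
      rw [hstep]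
      have hdel : delStep ((z : Int), live) r
          = ((z : Int) + 1, live.eraseIdx (r - z).toNat) := by
        unfold delStep
        rw [if_pos hzr]
        have : r - (z : Int) = (((r - z).toNat : Nat) : Int) := by omega
        rw [this, PySem.List.pop?_natCast _ _ hj]
        simp
      rw [hdel]
      have hcast : ((z : Int) + 1) = ((z + 1 : Nat) : Int) := by omega
      rw [hcast]
      exact ih (z + 1) (live.eraseIdx (r - z).toNat)
        (by
          intro r' hr'
          obtain ⟨h1, h2⟩ := hb r' (List.mem_cons_of_mem _ hr')
          rw [List.length_eraseIdx_of_lt hj]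
          constructor
          · exact h1
          · push_cast; omega)
        (fun s hs => hnz s (List.mem_of_mem_eraseIdx hs))
    · -- the marked cell is already an empty cell on top: both sides do nothing
      have hrz : r.toNat < z := by omega
      have hstep : colStep (List.replicate z "0" ++ live) r
          = List.replicate z "0" ++ live := by
        unfold colStep
        rw [PySem.List.pySetD_of_nonneg _ _ hr0]
        rw [List.set_append_left _ _ (by simp; omega)]
        have hset : (List.replicate z ("0" : String)).set r.toNat "0" = List.replicate z "0" := by
          apply List.ext_getElem (by simp)
          intro n hn1 hn2
          rw [List.getElem_set]
          split_ifs <;> simp [List.getElem_replicate]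
        rw [hset, colCasc, dif_neg]
        rintro ⟨h1, h2⟩
        apply h2
        rw [pyGetD_toNat _ _ (by omega)]
        have hidx : (r - 1).toNat < (List.replicate z "0").length := by simp; omega
        rw [List.getD_append _ _ _ _ hidx, List.getD_eq_getElem _ _ hidx, List.getElem_replicate]
      have hdel : delStep ((z : Int), live) r = ((z : Int), live) := by
        unfold delStep
        rw [if_neg hzr]
      rw [hstep, hdel]
      exact ih z live (fun r' hr' => hb r' (List.mem_cons_of_mem _ hr')) hnz

-- ---------- B's zero-prefix scan ----------
theorem advZ_drop (m : Nat) : ∀ (c : List String) (k : Nat), c.length - k ≤ m → k ≤ c.length →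
    advZ c (c.length : Int) (k : Int)
      = ((k + ((c.drop k).takeWhile (fun s => s == "0")).length : Nat) : Int) := by
  induction m with
  | zero =>
    intro c k hm hk
    have hk' : k = c.length := by omega
    rw [advZ, dif_neg (by omega)]
    subst hk'
    simp
  | succ m ihm =>
    intro c k hm hk
    rw [advZ]
    by_cases hcond : (k : Int) < c.length ∧ PySem.List.pyGetD c (k : Int) "" = "0"
    · rw [dif_pos hcond]
      have hklen : k < c.length := by omega
      have hck : c.getD k "" = "0" := by
        have h2 := hcond.2
        rw [pyGetD_toNat _ _ (by omega)] at h2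
        simpa using h2
      have hdrop : c.drop k = c.getD k "" :: c.drop (k + 1) := by
        rw [List.getD_eq_getElem _ _ (by simpa using hklen)]
        exact List.drop_eq_getElem_cons hklen
      have hcast : ((k : Int) + 1) = ((k + 1 : Nat) : Int) := by omega
      rw [hcast, ihm c (k + 1) (by omega) (by omega), hdrop, List.takeWhile_cons, hck]
      simp only [beq_self_eq_true, if_true, List.length_cons]
      omega
    · rw [dif_neg hcond]
      by_cases hklen : k < c.length
      · have hne : c.getD k "" ≠ "0" := by
          intro hkz
          apply hcond
          refine ⟨by omega, ?_⟩
          rw [pyGetD_toNat _ _ (by omega)]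
          simpa using hkz
        have hdrop : c.drop k = c.getD k "" :: c.drop (k + 1) := by
          rw [List.getD_eq_getElem _ _ (by simpa using hklen)]
          exact List.drop_eq_getElem_cons hklen
        rw [hdrop, List.takeWhile_cons]
        have hbe : (c.getD k "" == "0") = false := by
          simpa using hne
        rw [hbe]
        simp
      · rw [List.drop_eq_nil_of_le (by omega)]
        simp

-- ---------- order of the marks, per column ----------
theorem pairwise_insertBy {α : Type} (R : α → α → Prop) (before : α → α → Bool)
    (htr : ∀ a b c, R a b → R b c → R a c)
    (hbt : ∀ a b, before a b = true → R a b)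
    (hbf : ∀ a b, before a b = false → R b a)
    (x : α) : ∀ (l : List α), l.Pairwise R → (PySem.List.insertBy before x l).Pairwise R := by
  intro l
  induction l with
  | nil => intro _; simp [PySem.List.insertBy]
  | cons y ys ih =>
    intro hl
    rw [List.pairwise_cons] at hl
    obtain ⟨hy, hys⟩ := hl
    by_cases hb : before x y = true
    · rw [show PySem.List.insertBy before x (y :: ys) = x :: y :: ys from by
        simp [PySem.List.insertBy, hb]]
      refine List.Pairwise.cons ?_ (List.Pairwise.cons hy hys)
      intro z hz
      rcases List.mem_cons.1 hz with rfl | hzys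
      · exact hbt _ _ hb
      · exact htr _ _ _ (hbt _ _ hb) (hy z hzys)
    · have hb' : before x y = false := by simpa using hb
      rw [show PySem.List.insertBy before x (y :: ys) = y :: PySem.List.insertBy before x ys from by
        simp [PySem.List.insertBy, hb']]
      refine List.Pairwise.cons ?_ (ih hys)
      intro z hz
      rcases (PySem.List.mem_insertBy before x z ys).1 hz with rfl | hzys
      · exact hbf _ _ hb'
      · exact hy z hzys

theorem sorted2_pairwise_fst (memo : List (Int × Int)) :
    (PySem.List.sorted2 memo Prod.fst Prod.snd false).Pairwise (fun a b => a.1 ≤ b.1) := by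
  have hrfl : PySem.List.sorted2 memo Prod.fst Prod.snd false
      = memo.foldl (fun acc x => PySem.List.insertBy
          (fun a b => decide (a.1 < b.1) || (!decide (b.1 < a.1) && decide (a.2 < b.2))) x acc) [] := rfl
  rw [hrfl]
  have key : ∀ (l acc : List (Int × Int)), acc.Pairwise (fun a b => a.1 ≤ b.1) →
      (l.foldl (fun acc x => PySem.List.insertBy
        (fun a b => decide (a.1 < b.1) || (!decide (b.1 < a.1) && decide (a.2 < b.2))) x acc) acc).Pairwise
        (fun a b => a.1 ≤ b.1) := by
    intro l
    induction l with
    | nil => intro acc h; exact h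
    | cons x t ih =>
      intro acc h
      have h' := pairwise_insertBy (fun (a b : Int × Int) => a.1 ≤ b.1)
        (fun a b => decide (a.1 < b.1) || (!decide (b.1 < a.1) && decide (a.2 < b.2)))
        (fun a b c h1 h2 => le_trans h1 h2)
        (by
          intro a b hb
          simp only [Bool.or_eq_true, Bool.and_eq_true, Bool.not_eq_true', decide_eq_true_eq,
            decide_eq_false_iff_not] at hb
          rcases hb with h1 | ⟨h1, _⟩ <;> omega)
        (by
          intro a b hb
          simp only [Bool.or_eq_false_iff, Bool.and_eq_false_iff, Bool.not_eq_false',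
            decide_eq_true_eq, decide_eq_false_iff_not] at hb
          omega)
        x acc h
      exact ih _ h'
  exact key memo [] List.Pairwise.nil

theorem rowsA_eq (memo : List (Int × Int)) (j : Int) :
    PySem.List.sorted ((memo.filter (fun m => m.2 == j)).map Prod.fst) (fun x => x) false
      = ((PySem.List.sorted2 memo Prod.fst Prod.snd false).filter (fun m => m.2 == j)).map Prod.fst := by
  apply PySem.List.sorted_id_eq_of_perm_of_pairwise
  · exact ((PySem.List.sorted2_perm memo Prod.fst Prod.snd false).filter _).map _
  · exact List.pairwise_map.2 ((sorted2_pairwise_fst memo).sublist List.filter_sublist)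

-- ---------- the grouping dictionary ----------
theorem byCol_getD (memo : List (Int × Int)) (j : Int) :
    (memo.foldl (fun d m => d.modify m.2 [] (fun l => l ++ [m.1])) PySem.Dict.empty).getD j []
      = (memo.filter (fun m => m.2 == j)).map Prod.fst := by
  have h1 : memo.foldl (fun d m => d.modify m.2 [] (fun l => l ++ [m.1]))
        (PySem.Dict.empty : PySem.Dict Int (List Int))
      = (memo.map (fun m => (m.2, m.1))).foldl
          (fun d p => d.modify p.1 [] (fun l => l ++ [p.2])) PySem.Dict.empty := by
    rw [List.foldl_map]
  rw [h1, PySem.Dict.getD_foldl_modify_append]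
  rw [PySem.Dict.getD_empty, List.nil_append]
  rw [List.filter_map, List.map_map]
  rfl

theorem byCol_keys_nodup (memo : List (Int × Int)) :
    (memo.foldl (fun d m => d.modify m.2 [] (fun l => l ++ [m.1]))
      (PySem.Dict.empty : PySem.Dict Int (List Int))).keys.Nodup := by
  exact PySem.Dict.nodup_keys_foldl_modify_key memo Prod.snd [] (fun _ m l => l ++ [m.1]) _
    PySem.Dict.nodup_keys_empty

theorem byCol_contains (memo : List (Int × Int)) (j : Int) :
    ((memo.foldl (fun d m => d.modify m.2 [] (fun l => l ++ [m.1]))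
      (PySem.Dict.empty : PySem.Dict Int (List Int))).contains j = true) ↔ j ∈ memo.map Prod.snd := by
  rw [PySem.Dict.contains_iff_mem_keys]
  rw [PySem.Dict.keys_foldl_modify_key memo Prod.snd [] (fun _ m l => l ++ [m.1])]
  rw [PySem.Dict.keys_empty]
  rw [show PySem.Set.update ([] : PySem.Set Int) (memo.map Prod.snd)
      = PySem.Set.ofList (memo.map Prod.snd) from by rw [PySem.Set.ofList_eq_foldl]; rfl]
  exact PySem.Set.mem_ofList _ j

theorem get?_eq_some_getD {κ ν : Type} [BEq κ] [LawfulBEq κ] (d : PySem.Dict κ ν) (k : κ) (dflt : ν)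
    (h : d.contains k = true) : d.get? k = some (d.getD k dflt) := by
  cases hg : d.get? k with
  | none => rw [PySem.Dict.get?_eq_none_iff_contains] at hg; rw [h] at hg; cases hg
  | some v => simp [PySem.Dict.getD, hg]

theorem get?_foldl_insert (g : Int → List Int → List String) (j : Int) :
    ∀ (l : List (Int × List Int)) (d : PySem.Dict Int (List String)),
    (l.map Prod.fst).Nodup →
    (l.foldl (fun d p => d.insert p.1 (g p.1 p.2)) d).get? j
      = (match l.find? (fun p => p.1 == j) with
        | some p => some (g p.1 p.2)
        | none => d.get? j) := by
  intro l
  induction l with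
  | nil => intro d _; rfl
  | cons p t ih =>
    intro d hnd
    rw [List.map_cons, List.nodup_cons] at hnd
    simp only [List.foldl_cons]
    rw [ih _ hnd.2]
    by_cases hpj : p.1 = j
    · have hfind : t.find? (fun q => q.1 == j) = none := by
        rw [List.find?_eq_none]
        intro q hq hbeq
        apply hnd.1
        have : q.1 = j := by simpa using hbeq
        rw [hpj, ← this]
        exact List.mem_map_of_mem hq
      rw [hfind]
      have hfc : List.find? (fun q => q.1 == j) (p :: t) = some p := by
        rw [List.find?_cons_of_pos]
        simp [hpj]
      rw [hfc, PySem.Dict.get?_insert]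
      simp [hpj]
    · have hfc : List.find? (fun q => q.1 == j) (p :: t) = t.find? (fun q => q.1 == j) := by
        rw [List.find?_cons_of_neg]
        simp [hpj]
      rw [hfc]
      cases t.find? (fun q => q.1 == j) with
      | some q => rfl
      | none =>
        rw [PySem.Dict.get?_insert]
        rw [if_neg (fun hh => hpj hh.symm)]

theorem newCols_get? (board : List (List String)) (memo : List (Int × Int)) (j : Int) :
    ((memo.foldl (fun d m => d.modify m.2 [] (fun l => l ++ [m.1]))
        (PySem.Dict.empty : PySem.Dict Int (List Int))).items.foldl
      (fun d p => d.insert p.1 (compactCol board (board.length : Int) p.1 p.2))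
      (PySem.Dict.empty : PySem.Dict Int (List String))).get? j
    = if j ∈ memo.map Prod.snd then
        some (compactCol board (board.length : Int) j ((memo.filter (fun m => m.2 == j)).map Prod.fst))
      else none := by
  set byCol := memo.foldl (fun d m => d.modify m.2 [] (fun l => l ++ [m.1]))
    (PySem.Dict.empty : PySem.Dict Int (List Int)) with hbc
  have hnd : (byCol.items.map Prod.fst).Nodup := byCol_keys_nodup memo
  rw [get?_foldl_insert _ _ _ _ hnd]
  cases hfind : byCol.items.find? (fun p => p.1 == j) with
  | some p =>
    have hget : byCol.get? j = some p.2 := by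
      show (byCol.items.find? (fun q => q.1 == j)).map (fun q => q.2) = some p.2
      rw [hfind]; rfl
    have hp1 : p.1 = j := by
      have := List.find?_some hfind
      simpa using this
    have hcont : byCol.contains j = true := by
      by_contra hc
      have : byCol.get? j = none := by
        rw [PySem.Dict.get?_eq_none_iff_contains]
        simpa using hc
      rw [hget] at this; cases this
    have hmem : j ∈ memo.map Prod.snd := (byCol_contains memo j).1 hcont
    have hp2 : p.2 = (memo.filter (fun m => m.2 == j)).map Prod.fst := by
      have hgd : byCol.getD j [] = (memo.filter (fun m => m.2 == j)).map Prod.fst := byCol_getD memo j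
      have := get?_eq_some_getD byCol j [] hcont
      rw [hget] at this
      have hv : p.2 = byCol.getD j [] := Option.some.inj this
      rw [hv, hgd]
    have hred : (match some p with
        | some q => some (compactCol board (board.length : Int) q.1 q.2)
        | none => (PySem.Dict.empty : PySem.Dict Int (List String)).get? j)
        = some (compactCol board (board.length : Int) p.1 p.2) := rfl
    rw [hred, hp1, hp2, if_pos hmem]
  | none =>
    have hget : byCol.get? j = none := by
      show (byCol.items.find? (fun q => q.1 == j)).map (fun q => q.2) = none
      rw [hfind]; rfl
    have hcont : byCol.contains j = false := (PySem.Dict.get?_eq_none_iff_contains byCol j).1 hget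
    have hmem : j ∉ memo.map Prod.snd := by
      intro hmem
      rw [← byCol_contains memo j] at hmem
      rw [hcont] at hmem; cases hmem
    rw [if_neg hmem]
    rfl

-- ---------- misc glue ----------
theorem drop_length_takeWhile {α : Type} (p : α → Bool) (l : List α) :
    l.drop (l.takeWhile p).length = l.dropWhile p := by
  induction l with
  | nil => rfl
  | cons a t ih =>
    by_cases hp : p a = true
    · simp [hp, ih]
    · have hp' : p a = false := by simpa using hp
      simp [hp']

theorem entry_colAt (b : List (List String)) (i y : Nat) :
    (colAt b (y : Int)).getD i "" = (b.getD i []).getD y "" := by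
  rw [colAt_getD, pyGetD_toNat _ _ (by omega)]
  simp

-- ---------- B's per-column result, in closed form ----------
theorem compactCol_eq (board : List (List String)) (y : Int) (rows0 : List Int) :
    compactCol board (board.length : Int) y rows0
      = (fun s : Int × List String => List.replicate s.1.toNat "0" ++ s.2)
          ((PySem.List.sorted rows0 (fun x => x) false).foldl delStep
            ((((colAt board y).takeWhile (fun s => s == "0")).length : Int),
             (colAt board y).dropWhile (fun s => s == "0"))) := by
  have hstart : compactCol board (board.length : Int) y rows0
      = (fun s : Int × List String => List.replicate s.1.toNat "0" ++ s.2)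
          ((PySem.List.sorted rows0 (fun x => x) false).foldl delStep
            (advZ (colAt board y) (board.length : Int) 0,
             PySem.List.slice (colAt board y)
               (some (advZ (colAt board y) (board.length : Int) 0)) none)) := rfl
  rw [hstart]
  have hn : (board.length : Int) = ((colAt board y).length : Int) := by rw [length_colAt]
  have hadv : advZ (colAt board y) (board.length : Int) 0
      = ((((colAt board y).takeWhile (fun s => s == "0")).length : Nat) : Int) := by
    rw [hn]
    have h := advZ_drop (colAt board y).length (colAt board y) 0 (by omega) (by omega)
    simpa using h
  rw [hadv]
  have hslice : PySem.List.slice (colAt board y)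
      (some ((((colAt board y).takeWhile (fun s => s == "0")).length : Nat) : Int)) none
      = (colAt board y).dropWhile (fun s => s == "0") := by
    rw [PySem.List.slice_from _ (by omega)]
    rw [Int.toNat_natCast]
    exact drop_length_takeWhile _ _
  rw [hslice]

-- ---------- the final theorem ----------
theorem remove_all_eq_alt (board : List (List String)) (memo : List (Int × Int))
    (hpre : Pre_remove_all board memo) :
    remove_all board memo = remove_all_alt board memo := by
  have hms : ∀ m ∈ PySem.List.sorted2 memo Prod.fst Prod.snd false,
      0 ≤ m.1 ∧ 0 ≤ m.2 ∧ WideCol board m.2 := by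
    intro m hm
    have hmm : m ∈ memo := (PySem.List.sorted2_perm memo Prod.fst Prod.snd false).mem_iff.1 hm
    obtain ⟨h1, _, h3, h4, _⟩ := hpre m hmm
    exact ⟨h1, h3, h4⟩
  have hms01 : ∀ m ∈ PySem.List.sorted2 memo Prod.fst Prod.snd false, 0 ≤ m.1 ∧ 0 ≤ m.2 :=
    fun m hm => ⟨(hms m hm).1, (hms m hm).2.1⟩
  have hlens : (remove_all board memo).map List.length = board.map List.length := by
    unfold remove_all
    exact map_len_foldA _ _ hms01
  have hlenA : (remove_all board memo).length = board.length := by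
    have h := congrArg List.length hlens; simpa using h
  -- column y of A's result, marked case
  have hcol : ∀ (y : Nat), (y : Int) ∈ memo.map Prod.snd →
      colAt (remove_all board memo) (y : Int)
        = compactCol board (board.length : Int) (y : Int)
            ((memo.filter (fun m => m.2 == (y : Int))).map Prod.fst) := by
    intro y hy
    obtain ⟨m0, hm0mem, hm0⟩ := List.mem_map.1 hy
    obtain ⟨_, _, _, hwide0, hzp0⟩ := hpre m0 hm0mem
    rw [hm0] at hwide0 hzp0
    set c := colAt board (y : Int) with hc
    set z0 := (c.takeWhile (fun s => s == "0")).length with hz0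
    set live0 := c.dropWhile (fun s => s == "0") with hlive0
    have hsplit : c = List.replicate z0 "0" ++ live0 := by
      have h1 := List.takeWhile_append_dropWhile (p := fun s => s == "0") (l := c)
      have h2 : c.takeWhile (fun s => s == "0") = List.replicate z0 "0" := by
        rw [hz0]
        apply List.eq_replicate_of_mem
        intro s hs
        have h3 := List.mem_takeWhile_imp hs
        simpa using h3
      rw [← h1, h2]
    have hlc : z0 + live0.length = board.length := by
      have h := congrArg List.length hsplit
      rw [length_colAt] at h
      simp at h
      omega
    have hbounds : ∀ r ∈ PySem.List.sorted
        ((memo.filter (fun m => m.2 == (y : Int))).map Prod.fst) (fun x => x) false,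
        0 ≤ r ∧ r < (z0 : Int) + ((live0.length : Nat) : Int) := by
      intro r hr
      have hr2 : r ∈ (memo.filter (fun m => m.2 == (y : Int))).map Prod.fst :=
        (PySem.List.mem_sorted _ _ _ _).1 hr
      obtain ⟨m, hmf, hmr⟩ := List.mem_map.1 hr2
      have hmmem : m ∈ memo := List.mem_of_mem_filter hmf
      obtain ⟨ha, hb', _, _, _⟩ := hpre m hmmem
      rw [← hmr]
      refine ⟨ha, ?_⟩
      have : ((z0 : Int) + live0.length) = (board.length : Int) := by omega
      omega
    unfold remove_all
    rw [foldA_col _ _ _ (by omega) hms, ← rowsA_eq, ← hc, hsplit,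
      core _ z0 live0 hbounds hzp0, compactCol_eq, ← hc, ← hz0, ← hlive0]
  -- column y of A's result, unmarked case
  have hcol0 : ∀ (y : Nat), (y : Int) ∉ memo.map Prod.snd →
      colAt (remove_all board memo) (y : Int) = colAt board (y : Int) := by
    intro y hy
    unfold remove_all
    rw [foldA_col _ _ _ (by omega) hms]
    have hfil : (PySem.List.sorted2 memo Prod.fst Prod.snd false).filter
        (fun m => m.2 == (y : Int)) = [] := by
      rw [List.filter_eq_nil_iff]
      intro m hm hbeq
      apply hy
      have hmm : m ∈ memo := (PySem.List.sorted2_perm memo Prod.fst Prod.snd false).mem_iff.1 hm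
      have : m.2 = (y : Int) := by simpa using hbeq
      rw [← this]
      exact List.mem_map_of_mem hmm
    rw [hfil]
    rfl
  -- assemble
  apply List.ext_getElem?
  intro i
  by_cases hi : i < board.length
  · -- in range: compare row i
    have hiA : i < (remove_all board memo).length := by omega
    have hiB : i < (PySem.List.enumerate board 0).length := by
      rw [PySem.List.length_enumerate]; omega
    have hrowA : (remove_all board memo)[i]? = some ((remove_all board memo).getD i []) := by
      rw [List.getElem?_eq_getElem hiA, List.getD_eq_getElem _ _ hiA]
    have hrowB : (remove_all_alt board memo)[i]?
        = some ((PySem.List.enumerate (board.getD i []) 0).map (fun p =>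
            match ((memo.foldl (fun d m => d.modify m.2 [] (fun l => l ++ [m.1]))
                (PySem.Dict.empty : PySem.Dict Int (List Int))).items.foldl
              (fun d p => d.insert p.1 (compactCol board (board.length : Int) p.1 p.2))
              (PySem.Dict.empty : PySem.Dict Int (List String))).get? p.1 with
            | some nc => PySem.List.pyGetD nc ((0 : Int) + (i : Int)) ""
            | none => p.2)) := by
      show ((PySem.List.enumerate board 0).map _)[i]? = _
      rw [List.getElem?_map, PySem.List.getElem?_enumerate, List.getElem?_eq_getElem hi,
        List.getD_eq_getElem _ _ hi]
      rfl
    rw [hrowA, hrowB]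
    congr 1
    -- row lengths
    have hrl : ((remove_all board memo).getD i []).length = (board.getD i []).length := by
      have h1 := List.getD_map (remove_all board memo) [] (n := i) List.length
      have h2 := List.getD_map board [] (n := i) List.length
      simp only [List.length_nil] at h1 h2
      rw [← h1, ← h2, hlens]
    apply List.ext_getElem?
    intro y
    by_cases hylt : y < (board.getD i []).length
    · have hyA : y < ((remove_all board memo).getD i []).length := by omega
      have hyB : y < (PySem.List.enumerate (board.getD i []) 0).length := by
        rw [PySem.List.length_enumerate]; omega
      have heA : ((remove_all board memo).getD i [])[y]?
          = some (((remove_all board memo).getD i []).getD y "") := by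
        rw [List.getElem?_eq_getElem hyA, List.getD_eq_getElem _ _ hyA]
      have hentry : ((remove_all board memo).getD i []).getD y ""
          = (colAt (remove_all board memo) (y : Int)).getD i "" := (entry_colAt _ i y).symm
      have heB : ((PySem.List.enumerate (board.getD i []) 0).map (fun p =>
            match ((memo.foldl (fun d m => d.modify m.2 [] (fun l => l ++ [m.1]))
                (PySem.Dict.empty : PySem.Dict Int (List Int))).items.foldl
              (fun d p => d.insert p.1 (compactCol board (board.length : Int) p.1 p.2))
              (PySem.Dict.empty : PySem.Dict Int (List String))).get? p.1 with
            | some nc => PySem.List.pyGetD nc ((0 : Int) + (i : Int)) ""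
            | none => p.2))[y]?
          = some (match ((memo.foldl (fun d m => d.modify m.2 [] (fun l => l ++ [m.1]))
                (PySem.Dict.empty : PySem.Dict Int (List Int))).items.foldl
              (fun d p => d.insert p.1 (compactCol board (board.length : Int) p.1 p.2))
              (PySem.Dict.empty : PySem.Dict Int (List String))).get? ((0 : Int) + (y : Int)) with
            | some nc => PySem.List.pyGetD nc ((0 : Int) + (i : Int)) ""
            | none => (board.getD i []).getD y "") := by
        rw [List.getElem?_map, PySem.List.getElem?_enumerate, List.getElem?_eq_getElem (by simpa using hylt),
          List.getD_eq_getElem _ _ hylt]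
        rfl
      rw [heA, heB, hentry]
      congr 1
      rw [show ((0 : Int) + (y : Int)) = (y : Int) by omega]
      rw [newCols_get?]
      by_cases hymem : (y : Int) ∈ memo.map Prod.snd
      · rw [if_pos hymem]
        have hred : (match some (compactCol board (board.length : Int) (y : Int)
              ((memo.filter (fun m => m.2 == (y : Int))).map Prod.fst)) with
            | some nc => PySem.List.pyGetD nc ((0 : Int) + (i : Int)) ""
            | none => (board.getD i []).getD y "")
            = PySem.List.pyGetD (compactCol board (board.length : Int) (y : Int)
              ((memo.filter (fun m => m.2 == (y : Int))).map Prod.fst)) ((0 : Int) + (i : Int)) "" := rfl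
        have hgd : PySem.List.pyGetD (compactCol board (board.length : Int) (y : Int)
            ((memo.filter (fun m => m.2 == (y : Int))).map Prod.fst)) ((0 : Int) + (i : Int)) ""
            = (compactCol board (board.length : Int) (y : Int)
            ((memo.filter (fun m => m.2 == (y : Int))).map Prod.fst)).getD i "" := by
          rw [show ((0 : Int) + (i : Int)) = (i : Int) by omega, pyGetD_toNat _ _ (by omega)]
          simp
        rw [hred, hgd, hcol y hymem]
      · rw [if_neg hymem, hcol0 y hymem, entry_colAt]
    · have hyA : ((remove_all board memo).getD i [])[y]? = none := by
        rw [List.getElem?_eq_none]; omega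
      have hyB : y ≥ (PySem.List.enumerate (board.getD i []) 0).length := by
        rw [PySem.List.length_enumerate]; omega
      rw [hyA, List.getElem?_eq_none (by simpa using hyB)]
  · -- out of range: both none
    rw [List.getElem?_eq_none (by omega), List.getElem?_eq_none]
    have : (remove_all_alt board memo).length = board.length := by
      show ((PySem.List.enumerate board 0).map _).length = _
      rw [List.length_map, PySem.List.length_enumerate]
    omega

-- ===== VERDICT (by name: the statement is the Claim_ definition above) =====
theorem remove_all_spec : Claim_equal_remove_all := by
  intro board memo _ hpre
  unfold Spec_remove_all
  exact remove_all_eq_alt board memo hpre
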